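-- pv_equiv track=rewrite | github.com/pronad1/PYTHON_CODEs | first.py | split_blocks
-- ===== SOURCE A (Python) =====
-- def split_blocks(s):
--     if not s:
--         return []
--     blocks = []
--     current = s[0]
--     for c in s[1:]:
--         if c != current[-1]:
--             blocks.append(current)
--             current = c
--         else:
--             current += c
--     blocks.append(current)
--     return blocks
-- ===== SOURCE B (Python) =====
-- def split_blocks(s):
--     blocks = []
--     i = 0
--     n = len(s)
--     while i < n:
--         j = i + 1
--         while j < n and s[j] == s[i]:
--             j += 1
--         blocks.append(s[i:j])
--         i = j
--     return blocks
-- ===== Notes on version B (the rewrite author's own statement) =====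
-- stated objective: alternative
-- what changed: B replaces A's accumulator loop (growing a 'current' string char by char and flushing it on change) with a two-pointer scan that finds each run's end index and appends the slice s[i:j] whole.
import Mathlib
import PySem

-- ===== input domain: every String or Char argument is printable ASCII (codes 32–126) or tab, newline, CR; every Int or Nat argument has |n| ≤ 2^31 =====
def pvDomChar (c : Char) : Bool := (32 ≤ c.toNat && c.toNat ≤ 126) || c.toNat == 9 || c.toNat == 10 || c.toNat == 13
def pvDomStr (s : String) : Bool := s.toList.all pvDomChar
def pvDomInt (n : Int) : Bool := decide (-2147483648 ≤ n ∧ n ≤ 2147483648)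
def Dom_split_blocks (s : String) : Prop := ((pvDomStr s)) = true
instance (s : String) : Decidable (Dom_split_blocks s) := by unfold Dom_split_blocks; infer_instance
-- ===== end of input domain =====

-- B is a two-pointer scan: it finds each run's end index and slices whole runs off, instead of
-- A's accumulator loop; objective: alternative decomposition (not faster).

-- ===== PORT A =====
-- A's loop over s[1:], carrying (blocks, current); current is always nonempty, so
-- current[-1] is its last char (getLast! is exact here).
def split_blocks (s : String) : List String :=
  match s.toList with
  | [] => []
  | c0 :: rest =>
    let r := rest.foldl
      (fun (st : List (List Char) × List Char) (c : Char) =>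
        if c ≠ st.2.getLast! then (st.1 ++ [st.2], [c]) else (st.1, st.2 ++ [c]))
      ([], [c0])
    (r.1 ++ [r.2]).map (fun l => String.ofList l)

-- ===== PORT B =====
-- Source B's inner while loop: j advances past chars equal to s[i]; here, the run length of c over cs
def pvRunLen (c : Char) : List Char → Nat
  | [] => 0
  | d :: ds => if d == c then 1 + pvRunLen c ds else 0

theorem pvRunLen_le (c : Char) (cs : List Char) : pvRunLen c cs ≤ cs.length := by
  induction cs with
  | nil => simp [pvRunLen]
  | cons d ds ih => simp only [pvRunLen]; split <;> simp <;> omega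

-- Source B's outer loop: each iteration slices off one run s[i:j] and continues at j; expressed as
-- recursion on the remaining suffix (the loop state i is the amount dropped)
def pvSplitRuns : List Char → List (List Char)
  | [] => []
  | c :: cs =>
    let i := pvRunLen c cs
    (c :: cs.take i) :: pvSplitRuns (cs.drop i)
termination_by l => l.length
decreasing_by
  simp only [List.length_drop, List.length_cons]
  have := pvRunLen_le c cs
  omega

def split_blocks_alt (s : String) : List String :=
  (pvSplitRuns s.toList).map (fun l => String.ofList l)

-- ===== PRECONDITION & SPEC =====
def Spec_split_blocks (s : String) (out : List String) : Prop := out = split_blocks_alt s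
instance (s : String) (out : List String) : Decidable (Spec_split_blocks s out) := by unfold Spec_split_blocks; infer_instance

-- ===== CLAIM (what is proved, stated in full; the proofs are below) =====
def Claim_equal_split_blocks : Prop := ∀ (s : String), Dom_split_blocks s → Spec_split_blocks s (split_blocks s)

-- ===== LEMMAS AND PROOFS =====

-- back-to-front characterisation of the run decomposition (proof-only helper)
def pvGroupRuns : List Char → List (List Char)
  | [] => []
  | c :: cs =>
    match pvGroupRuns cs with
    | [] => [[c]]
    | g :: gs => if g.head? = some c then (c :: g) :: gs else [c] :: g :: gs

-- how a pending 'current' merges with the runs of the remaining suffix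
def pvAttach (cur : List Char) : List (List Char) → List (List Char)
  | [] => [cur]
  | g :: gs => if g.head? = some cur.getLast! then (cur ++ g) :: gs else cur :: g :: gs

theorem pvSplitRuns_step (c : Char) (cs : List Char) :
    pvSplitRuns (c :: cs) =
      (match pvSplitRuns cs with
       | [] => [[c]]
       | g :: gs => if g.head? = some c then (c :: g) :: gs else [c] :: g :: gs) := by
  cases cs with
  | nil => simp [pvSplitRuns, pvRunLen]
  | cons d ds =>
    by_cases h : d = c
    · subst h
      simp only [pvSplitRuns, pvRunLen, beq_self_eq_true, if_true]
      rw [Nat.add_comm]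
      simp [List.take_succ_cons, List.drop_succ_cons]
    · have hb : (d == c) = false := by simp [h]
      simp [pvSplitRuns, pvRunLen, hb, h]

theorem pvSplitRuns_eq_groupRuns (l : List Char) : pvSplitRuns l = pvGroupRuns l := by
  induction l with
  | nil => simp [pvSplitRuns, pvGroupRuns]
  | cons c cs ih => rw [pvSplitRuns_step, ih]; rfl

-- loop invariant for A's fold
theorem pvFold_invariant (rest : List Char) :
    ∀ (blocks : List (List Char)) (cur : List Char),
      (let r := rest.foldl
        (fun (st : List (List Char) × List Char) (c : Char) =>
          if c ≠ st.2.getLast! then (st.1 ++ [st.2], [c]) else (st.1, st.2 ++ [c]))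
        (blocks, cur)
       r.1 ++ [r.2]) = blocks ++ pvAttach cur (pvGroupRuns rest) := by
  induction rest with
  | nil => intro blocks cur; simp [pvAttach, pvGroupRuns]
  | cons c rest' ih =>
    intro blocks cur
    rw [List.foldl_cons]
    by_cases h : c = cur.getLast!
    · rw [show (if c ≠ (blocks, cur).2.getLast! then ((blocks, cur).1 ++ [(blocks, cur).2], [c])
            else ((blocks, cur).1, (blocks, cur).2 ++ [c])) = (blocks, cur ++ [c])
            from if_neg (not_not_intro h)]
      rw [ih]
      congr 1
      have h' : c = cur.getLast?.getD 'A' := by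
        rwa [List.getLast!_eq_getLast?_getD] at h
      simp only [pvGroupRuns]
      cases hg : pvGroupRuns rest' with
      | nil => simp [pvAttach, List.getLast!_eq_getLast?_getD, ← h']
      | cons g gs =>
        by_cases hh : g.head? = some c
        · simp [pvAttach, hh, List.getLast!_eq_getLast?_getD, ← h']
        · simp [pvAttach, hh, List.getLast!_eq_getLast?_getD, ← h']
    · rw [show (if c ≠ (blocks, cur).2.getLast! then ((blocks, cur).1 ++ [(blocks, cur).2], [c])
            else ((blocks, cur).1, (blocks, cur).2 ++ [c])) = (blocks ++ [cur], [c])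
            from if_pos h]
      rw [ih]
      rw [List.append_assoc, List.singleton_append]
      congr 1
      have h' : ¬ c = cur.getLast?.getD 'A' := by
        rwa [List.getLast!_eq_getLast?_getD] at h
      simp only [pvGroupRuns]
      cases hg : pvGroupRuns rest' with
      | nil => simp [pvAttach, List.getLast!_eq_getLast?_getD, h']
      | cons g gs =>
        by_cases hh : g.head? = some c
        · simp [pvAttach, hh, List.getLast!_eq_getLast?_getD, h']
        · simp [pvAttach, hh, List.getLast!_eq_getLast?_getD, h']

theorem pvAttach_single (c : Char) (gs : List (List Char)) :
    pvAttach [c] gs =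
      (match gs with
       | [] => [[c]]
       | g :: gs' => if g.head? = some c then (c :: g) :: gs' else [c] :: g :: gs') := by
  cases gs with
  | nil => rfl
  | cons g gs' => simp [pvAttach]

-- ===== VERDICT (by name: the statement is the Claim_ definition above) =====
theorem split_blocks_spec : Claim_equal_split_blocks := by
  intro s _
  unfold Spec_split_blocks split_blocks split_blocks_alt
  cases hl : s.toList with
  | nil => simp [pvSplitRuns]
  | cons c0 rest =>
    simp only
    rw [pvFold_invariant rest [] [c0], pvSplitRuns_eq_groupRuns, pvAttach_single]
    simp [pvGroupRuns]
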